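-- pv_equiv track=rewrite | github.com/intelxed/xed | pysrc/read-encfile.py | group_bits_and_letter_runs
-- ===== SOURCE A (Python) =====
-- def group_bits_and_letter_runs(s):
--     """
--     @type s: string
--     @param s: string of the form [01a-z]+
--
--     @rtype: list of strings
--     @return: list of binary bit strings and distinct letter runs
--     """
--     out = []
--     run = None
--     last_letter = None
--     last_was_number  = False
--     # remove underscores from s
--     for i in list(s.replace('_','')):
--         if i=='0' or i=='1':
--             if last_was_number:
--                 run += i
--             else:
--                 if run:
--                     out.append(run) # end last run
--                 run = i
--             last_was_number = True
--             last_letter = None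
--
--         else: # i is a letter
--
--             if last_letter and last_letter == i:
--                 run += i
--             else:
--                 if run:
--                     out.append(run) # end last run
--                 run = i
--             last_was_number = False
--             last_letter = i
--     if run:
--         out.append(run)
--     return out
-- ===== SOURCE B (Python) =====
-- def group_bits_and_letter_runs(s):
--     """Greedy prefix peeling: instead of A's per-character state machine
--     (run/last_letter/last_was_number flags), repeatedly scan forward to the
--     end of the maximal run starting at i and slice it out of the string."""
--     def key(c):
--         return '0' if c in '01' else c
--     t = s.replace('_', '')
--     out = []
--     i, n = 0, len(t)
--     while i < n:
--         j = i + 1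
--         while j < n and key(t[j]) == key(t[i]):
--             j += 1
--         out.append(t[i:j])
--         i = j
--     return out
-- ===== Notes on version B (the rewrite author's own statement) =====
-- stated objective: alternative
-- what changed: Replaces A's per-character state machine (out/run/last_letter/last_was_number flags, appending one character at a time to a growing run) with greedy prefix peeling: an index scan finds the end of each maximal run in one inner loop and slices it out of the string whole.
import Mathlib
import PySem

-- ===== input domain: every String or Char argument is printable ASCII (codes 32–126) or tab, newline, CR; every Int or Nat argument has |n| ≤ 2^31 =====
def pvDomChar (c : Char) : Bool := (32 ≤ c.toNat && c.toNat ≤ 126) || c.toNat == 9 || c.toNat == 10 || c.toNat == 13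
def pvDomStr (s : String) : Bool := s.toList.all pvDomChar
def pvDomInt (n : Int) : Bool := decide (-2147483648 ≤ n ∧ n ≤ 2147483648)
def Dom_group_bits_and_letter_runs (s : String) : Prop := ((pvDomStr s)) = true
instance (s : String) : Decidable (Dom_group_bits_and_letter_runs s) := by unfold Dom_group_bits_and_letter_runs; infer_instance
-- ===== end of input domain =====

-- B replaces A's per-character state machine by greedy prefix peeling: each
-- maximal run is found by one forward scan and sliced out whole (objective:
-- alternative; same cost).

-- ===== PORT A =====
-- State (out, run, last_letter, last_was_number); runs are kept as List Char and
-- turned into Strings only at the end (Lean's String ops are kernel-opaque).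
-- Python's `run = None` is modeled as []: the code only ever tests run's truthiness
-- ([] and None are both falsy) before run is set, so this is exact.
def pvAStep (st : List (List Char) × List Char × Option Char × Bool) (c : Char) :
    List (List Char) × List Char × Option Char × Bool :=
  let (out, run, lastLetter, lwn) := st
  if c = '0' ∨ c = '1' then
    if lwn then (out, run ++ [c], none, true)
    else ((if run ≠ [] then out ++ [run] else out), [c], none, true)
  else
    if lastLetter = some c then (out, run ++ [c], some c, false)
    else ((if run ≠ [] then out ++ [run] else out), [c], some c, false)

def group_bits_and_letter_runs (s : String) : List String :=
  let r := (PySem.Str.replace s "_" "").toList.foldl pvAStep ([], [], none, false)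
  (r.1 ++ (if r.2.1 ≠ [] then [r.2.1] else [])).map String.mk

-- ===== PORT B =====
-- key: both bit characters share one key, each letter is its own key.
def pvKey (c : Char) : Char := if c = '0' ∨ c = '1' then '0' else c

-- Source B's outer while loop: peel the maximal run starting at the current position
-- (the inner `while j < n and key(t[j]) == key(t[i])` scan is the takeWhile, the
-- slice t[i:j] / continuation at j is the peeled prefix / dropWhile suffix).
def pvPeel : List Char → List (List Char)
  | [] => []
  | c :: cs =>
      (c :: cs.takeWhile (fun d => pvKey d == pvKey c)) ::
        pvPeel (cs.dropWhile (fun d => pvKey d == pvKey c))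
termination_by t => t.length
decreasing_by
  have := List.length_dropWhile_le (fun d => pvKey d == pvKey c) cs
  simp; omega

def group_bits_and_letter_runs_alt (s : String) : List String :=
  (pvPeel (PySem.Str.replace s "_" "").toList).map String.mk

-- ===== PRECONDITION & SPEC =====
def Spec_group_bits_and_letter_runs (s : String) (out : List String) : Prop := out = group_bits_and_letter_runs_alt s
instance (s : String) (out : List String) : Decidable (Spec_group_bits_and_letter_runs s out) := by unfold Spec_group_bits_and_letter_runs; infer_instance

-- ===== CLAIM (what is proved, stated in full; the proofs are below) =====
def Claim_equal_group_bits_and_letter_runs : Prop := ∀ (s : String), Dom_group_bits_and_letter_runs s → Spec_group_bits_and_letter_runs s (group_bits_and_letter_runs s)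

-- ===== LEMMAS AND PROOFS =====

-- canonical A-state components determined by the last character p of the current run
def pvLL (p : Char) : Option Char := if p = '0' ∨ p = '1' then none else some p
def pvLWN (p : Char) : Bool := decide (p = '0' ∨ p = '1')

-- one A-step from a canonical state extends the run exactly when the keys agree
lemma pvAStep_canon (out : List (List Char)) (q : List Char) (p c : Char) :
    pvAStep (out, q ++ [p], pvLL p, pvLWN p) c =
      if pvKey p = pvKey c then (out, q ++ [p] ++ [c], pvLL c, pvLWN c)
      else (out ++ [q ++ [p]], [c], pvLL c, pvLWN c) := by
  by_cases hc : c = '0' ∨ c = '1' <;> by_cases hp : p = '0' ∨ p = '1'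
  · simp [pvAStep, pvKey, pvLL, pvLWN, hc, hp]
  · have hk : ¬ (pvKey p = pvKey c) := by
      simp only [pvKey, if_neg hp, if_pos hc]; intro h; exact hp (Or.inl h)
    simp [pvAStep, pvLL, pvLWN, hc, hp, hk]
  · have hk : ¬ (pvKey p = pvKey c) := by
      simp only [pvKey, if_pos hp, if_neg hc]; intro h; exact hc (Or.inl h.symm)
    have hll : ¬ (pvLL p = some c) := by simp [pvLL, hp]
    simp [pvAStep, pvLL, pvLWN, hc, hp, hk]
  · by_cases hpc : p = c
    · have hk : pvKey p = pvKey c := by simp [pvKey, hc, hpc]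
      simp [pvAStep, pvLL, pvLWN, hc, hpc]
    · have hk : ¬ (pvKey p = pvKey c) := by simp [pvKey, hp, hc]; exact hpc
      have hll : ¬ (pvLL p = some c) := by simp [pvLL, hp]; exact hpc
      simp [pvAStep, pvLL, pvLWN, hc, hk]
      exact fun _ _ => hpc

-- loop invariant: A's fold from a canonical state (current run q++[p]), flushed,
-- equals the current run extended by the maximal same-key prefix of the rest,
-- followed by B's peeling of the remaining suffix.
lemma pvLoop (cs : List Char) : ∀ (out : List (List Char)) (q : List Char) (p : Char),
    (cs.foldl pvAStep (out, q ++ [p], pvLL p, pvLWN p)).1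
      ++ (if (cs.foldl pvAStep (out, q ++ [p], pvLL p, pvLWN p)).2.1 ≠ [] then
            [(cs.foldl pvAStep (out, q ++ [p], pvLL p, pvLWN p)).2.1] else [])
    = out ++ [(q ++ [p]) ++ cs.takeWhile (fun d => pvKey d == pvKey p)]
          ++ pvPeel (cs.dropWhile (fun d => pvKey d == pvKey p)) := by
  induction cs with
  | nil => intro out q p; simp [pvPeel]
  | cons c cs ih =>
    intro out q p
    rw [List.foldl_cons, pvAStep_canon]
    by_cases hk : pvKey p = pvKey c
    · rw [if_pos hk]
      have htw : (c :: cs).takeWhile (fun d => pvKey d == pvKey p)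
          = c :: cs.takeWhile (fun d => pvKey d == pvKey c) := by
        rw [List.takeWhile_cons_of_pos (by simp [hk])]
        simp only [hk]
      have hdw : (c :: cs).dropWhile (fun d => pvKey d == pvKey p)
          = cs.dropWhile (fun d => pvKey d == pvKey c) := by
        rw [List.dropWhile_cons_of_pos (by simp [hk])]
        simp only [hk]
      rw [htw, hdw]
      have := ih out (q ++ [p]) c
      simpa using this
    · rw [if_neg hk]
      have htw : (c :: cs).takeWhile (fun d => pvKey d == pvKey p) = [] :=
        List.takeWhile_cons_of_neg (by simp [Ne.symm hk])
      have hdw : (c :: cs).dropWhile (fun d => pvKey d == pvKey p) = c :: cs :=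
        List.dropWhile_cons_of_neg (by simp [Ne.symm hk])
      rw [htw, hdw]
      have := ih (out ++ [q ++ [p]]) [] c
      simp only [List.nil_append] at this
      rw [this, pvPeel]
      simp

-- ===== VERDICT (by name: the statement is the Claim_ definition above) =====
theorem group_bits_and_letter_runs_spec : Claim_equal_group_bits_and_letter_runs := by
  intro s _
  unfold Spec_group_bits_and_letter_runs group_bits_and_letter_runs group_bits_and_letter_runs_alt
  cases h : (PySem.Str.replace s "_" "").toList with
  | nil => simp [pvPeel]
  | cons c cs =>
    rw [List.foldl_cons]
    have h0 : pvAStep ([], [], none, false) c = ([], [] ++ [c], pvLL c, pvLWN c) := by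
      by_cases hc : c = '0' ∨ c = '1' <;> simp [pvAStep, pvLL, pvLWN, hc]
    rw [h0]
    have := pvLoop cs [] [] c
    rw [pvPeel]
    simp only [List.nil_append] at this ⊢
    rw [this]
    simp
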